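-- pv_equiv track=rewrite | github.com/advancedlooser70-hue/AI-text-moderator- | api/moderate.py | create_generic_polite_message
-- ===== SOURCE A (Python) =====
-- def create_generic_polite_message(original_text: str) -> str:
--     """Create a context-aware polite message when rephrasing fails."""
--     text_lower = original_text.lower()
--
--     if any(word in text_lower for word in ["stupid", "dumb", "idiot", "moron"]):
--         return "I don't think that's the best approach."
--     elif any(word in text_lower for word in ["hate", "awful", "terrible", "worst"]):
--         return "I'm not comfortable with this."
--     elif any(word in text_lower for word in ["shut up", "shut", "quiet"]):
--         return "I'd prefer if we could pause this conversation."
--     elif any(word in text_lower for word in ["wrong", "disagree", "no"]):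
--         return "I have a different perspective on this."
--     elif any(word in text_lower for word in ["ugly", "bad", "trash"]):
--         return "I don't think this meets our standards."
--     elif "?" in original_text:
--         return "Could you help me understand this better?"
--     else:
--         return "I'd like to express this more constructively."
-- ===== SOURCE B (Python) =====
-- KEYWORDS = [
--     ("stupid", 0), ("dumb", 0), ("idiot", 0), ("moron", 0),
--     ("hate", 1), ("awful", 1), ("terrible", 1), ("worst", 1),
--     ("shut up", 2), ("shut", 2), ("quiet", 2),
--     ("wrong", 3), ("disagree", 3), ("no", 3),
--     ("ugly", 4), ("bad", 4), ("trash", 4),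
-- ]
--
-- MESSAGES = [
--     "I don't think that's the best approach.",
--     "I'm not comfortable with this.",
--     "I'd prefer if we could pause this conversation.",
--     "I have a different perspective on this.",
--     "I don't think this meets our standards.",
-- ]
--
--
-- def create_generic_polite_message(original_text: str) -> str:
--     """Create a context-aware polite message when rephrasing fails."""
--     text_lower = original_text.lower()
--     # Single multi-pattern scan over the text: at each position test every
--     # keyword for a match starting there, keeping the smallest priority seen.
--     best = None
--     for i in range(len(text_lower)):
--         for word, priority in KEYWORDS:
--             if text_lower.startswith(word, i) and (best is None or priority < best):
--                 best = priority
--     if best is not None: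
--         return MESSAGES[best]
--     if "?" in original_text:
--         return "Could you help me understand this better?"
--     return "I'd like to express this more constructively."
-- ===== Notes on version B (the rewrite author's own statement) =====
-- stated objective: alternative
-- what changed: Replaces the ordered chain of whole-text substring-membership tests with a single multi-pattern scan over text positions (Aho-Corasick-style brute force): at each index every keyword is tested with startswith and a minimum-priority accumulator is kept; the minimum priority indexes the reply table.
import Mathlib
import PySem

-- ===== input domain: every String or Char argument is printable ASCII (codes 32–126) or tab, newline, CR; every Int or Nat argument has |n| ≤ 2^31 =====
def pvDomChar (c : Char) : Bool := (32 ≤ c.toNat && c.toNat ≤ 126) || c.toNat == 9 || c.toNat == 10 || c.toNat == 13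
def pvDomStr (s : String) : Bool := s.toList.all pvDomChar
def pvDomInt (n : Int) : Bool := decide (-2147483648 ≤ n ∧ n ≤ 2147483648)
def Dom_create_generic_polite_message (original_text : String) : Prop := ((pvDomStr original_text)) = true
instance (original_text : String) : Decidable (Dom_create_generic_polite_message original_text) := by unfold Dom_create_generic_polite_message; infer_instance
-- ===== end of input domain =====

-- B replaces A's ordered chain of whole-text membership tests by a single position-by-position
-- multi-pattern scan keeping a minimum-priority accumulator (alternative algorithm, same cost).

-- ===== PORT A =====
def create_generic_polite_message (original_text : String) : String :=
  let text_lower := PySem.Str.lower original_text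
  if ["stupid", "dumb", "idiot", "moron"].any (fun word => PySem.Str.isIn word text_lower) then
    "I don't think that's the best approach."
  else if ["hate", "awful", "terrible", "worst"].any (fun word => PySem.Str.isIn word text_lower) then
    "I'm not comfortable with this."
  else if ["shut up", "shut", "quiet"].any (fun word => PySem.Str.isIn word text_lower) then
    "I'd prefer if we could pause this conversation."
  else if ["wrong", "disagree", "no"].any (fun word => PySem.Str.isIn word text_lower) then
    "I have a different perspective on this."
  else if ["ugly", "bad", "trash"].any (fun word => PySem.Str.isIn word text_lower) then
    "I don't think this meets our standards."
  else if PySem.Str.isIn "?" original_text then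
    "Could you help me understand this better?"
  else
    "I'd like to express this more constructively."

-- ===== PORT B =====
def pvKeywords : List (String × Nat) :=
  [("stupid", 0), ("dumb", 0), ("idiot", 0), ("moron", 0),
   ("hate", 1), ("awful", 1), ("terrible", 1), ("worst", 1),
   ("shut up", 2), ("shut", 2), ("quiet", 2),
   ("wrong", 3), ("disagree", 3), ("no", 3),
   ("ugly", 4), ("bad", 4), ("trash", 4)]

def pvMessages : List String :=
  ["I don't think that's the best approach.",
   "I'm not comfortable with this.",
   "I'd prefer if we could pause this conversation.",
   "I have a different perspective on this.",
   "I don't think this meets our standards."]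

-- inner loop over KEYWORDS at position i; Python's text_lower.startswith(word, i) with
-- 0 ≤ i is exact as word.toList.isPrefixOf (tl.drop i)
def pvInnerLoop (tl : List Char) (i : Nat) : List (String × Nat) → Option Nat → Option Nat
  | [], best => best
  | (word, priority) :: rest, best =>
      pvInnerLoop tl i rest
        (if word.toList.isPrefixOf (tl.drop i) &&
            (match best with | none => true | some b => decide (priority < b))
         then some priority else best)

-- outer loop: for i in range(len(text_lower))
def pvScanLoop (tl : List Char) : List Nat → Option Nat → Option Nat
  | [], best => best
  | i :: rest, best => pvScanLoop tl rest (pvInnerLoop tl i pvKeywords best)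

def create_generic_polite_message_alt (original_text : String) : String :=
  let text_lower := PySem.Str.lower original_text
  -- range(len(text_lower)) is exact as List.range text_lower.toList.length
  match pvScanLoop text_lower.toList (List.range text_lower.toList.length) none with
  | some best => pvMessages.getD best ""   -- MESSAGES[best]: best is always in 0..4
  | none =>
      if PySem.Str.isIn "?" original_text then "Could you help me understand this better?"
      else "I'd like to express this more constructively."

-- ===== PRECONDITION & SPEC =====
def Spec_create_generic_polite_message (original_text : String) (out : String) : Prop := out = create_generic_polite_message_alt original_text
instance (original_text : String) (out : String) : Decidable (Spec_create_generic_polite_message original_text out) := by unfold Spec_create_generic_polite_message; infer_instance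

-- ===== CLAIM (what is proved, stated in full; the proofs are below) =====
def Claim_equal_create_generic_polite_message : Prop := ∀ (original_text : String), Dom_create_generic_polite_message original_text → Spec_create_generic_polite_message original_text (create_generic_polite_message original_text)

-- ===== LEMMAS AND PROOFS =====

-- the min-accumulator update performed by B's loops
def pvOmin (b : Option Nat) (p : Nat) : Option Nat :=
  match b with | none => some p | some m => if p < m then some p else some m

def pvMins (L : List Nat) : Option Nat := L.foldl pvOmin none

lemma pvInner_eq_foldl (tl : List Char) (i : Nat) :
    ∀ (ks : List (String × Nat)) (best : Option Nat),
      pvInnerLoop tl i ks best =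
        ((ks.filter (fun kp => kp.1.toList.isPrefixOf (tl.drop i))).map Prod.snd).foldl pvOmin best := by
  intro ks
  induction ks with
  | nil => intro best; rfl
  | cons kp rest ih =>
    intro best
    obtain ⟨w, p⟩ := kp
    by_cases h : w.toList.isPrefixOf (tl.drop i)
    · cases best <;>
        simp [pvInnerLoop, pvOmin, h, ih]
    · simp [pvInnerLoop, h, ih]

lemma pvScan_eq_foldl (tl : List Char) :
    ∀ (pos : List Nat) (best : Option Nat),
      pvScanLoop tl pos best =
        (pos.flatMap (fun i =>
          ((pvKeywords.filter (fun kp => kp.1.toList.isPrefixOf (tl.drop i))).map Prod.snd))).foldl pvOmin best := by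
  intro pos
  induction pos with
  | nil => intro best; rfl
  | cons i rest ih =>
    intro best
    simp [pvScanLoop, ih, pvInner_eq_foldl, List.foldl_append]

lemma pvFold_some : ∀ (L : List Nat) (a : Nat), L.foldl pvOmin (some a) = some (L.foldl Nat.min a) := by
  intro L
  induction L with
  | nil => intro a; rfl
  | cons p L ih =>
    intro a
    have h : pvOmin (some a) p = some (Nat.min a p) := by
      unfold pvOmin
      rcases Nat.lt_or_ge p a with hpa | hpa
      · simp [hpa, Nat.min_eq_right hpa.le]
      · simp [Nat.not_lt.mpr hpa, Nat.min_eq_left hpa]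
    rw [List.foldl_cons, h, ih, List.foldl_cons]

lemma pvFoldMin_props : ∀ (L : List Nat) (a : Nat),
    (L.foldl Nat.min a = a ∨ L.foldl Nat.min a ∈ L) ∧ L.foldl Nat.min a ≤ a ∧
      ∀ x ∈ L, L.foldl Nat.min a ≤ x := by
  intro L
  induction L with
  | nil => intro a; simp
  | cons p L ih =>
    intro a
    obtain ⟨hmem, hle, hlb⟩ := ih (Nat.min a p)
    rw [List.foldl_cons]
    refine ⟨?_, ?_, ?_⟩
    · rcases hmem with h | h
      · rcases Nat.le_total a p with hap | hap
        · left; rw [h]; exact Nat.min_eq_left hap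
        · right; rw [List.mem_cons]; left; rw [h]; exact Nat.min_eq_right hap
      · right; exact List.mem_cons_of_mem _ h
    · exact hle.trans (Nat.min_le_left a p)
    · intro x hx
      rcases List.mem_cons.mp hx with rfl | hx
      · exact hle.trans (Nat.min_le_right a x)
      · exact hlb x hx

lemma pvMins_some_iff (L : List Nat) (m : Nat) :
    pvMins L = some m ↔ m ∈ L ∧ ∀ x ∈ L, m ≤ x := by
  cases L with
  | nil => simp [pvMins]
  | cons p L =>
    unfold pvMins
    rw [List.foldl_cons, show pvOmin none p = some p from rfl, pvFold_some]
    obtain ⟨hmem, hle, hlb⟩ := pvFoldMin_props L p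
    constructor
    · intro h
      have hm : L.foldl Nat.min p = m := by injection h
      subst hm
      refine ⟨?_, ?_⟩
      · rcases hmem with h | h
        · rw [h]; exact List.mem_cons_self
        · exact List.mem_cons_of_mem _ h
      · intro x hx
        rcases List.mem_cons.mp hx with rfl | hx
        · exact hle
        · exact hlb x hx
    · rintro ⟨hmL, hlbm⟩
      have h1 : L.foldl Nat.min p ≤ m := by
        rcases List.mem_cons.mp hmL with rfl | hx
        · exact hle
        · exact hlb m hx
      have h2 : m ≤ L.foldl Nat.min p := by
        rcases hmem with h | h
        · rw [h]; exact hlbm p List.mem_cons_self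
        · exact hlbm _ (List.mem_cons_of_mem _ h)
      have : L.foldl Nat.min p = m := le_antisymm h1 h2
      rw [this]

lemma pvMins_none_iff (L : List Nat) : pvMins L = none ↔ L = [] := by
  cases L with
  | nil => simp [pvMins]
  | cons p L =>
    unfold pvMins
    rw [List.foldl_cons, show pvOmin none p = some p from rfl, pvFold_some]
    simp

lemma pvMins_congr (L L' : List Nat) (h : ∀ x, x ∈ L ↔ x ∈ L') : pvMins L = pvMins L' := by
  cases hL : pvMins L with
  | none =>
    have : L = [] := (pvMins_none_iff L).mp hL
    subst this
    have : L' = [] := by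
      cases hL' : L' with
      | nil => rfl
      | cons a t => exfalso; have := (h a).mpr (by simp [hL']); simp at this
    rw [this]
    rfl
  | some m =>
    obtain ⟨hm, hlb⟩ := (pvMins_some_iff L m).mp hL
    have : pvMins L' = some m := by
      rw [pvMins_some_iff]
      exact ⟨(h m).mp hm, fun x hx => hlb x ((h x).mpr hx)⟩
    rw [this]

-- priority p "fires" on tl: some keyword of priority p occurs in tl
def pvRule (tl : List Char) (p : Nat) : Bool :=
  (pvKeywords.filter (fun kp => kp.2 == p)).any (fun kp => PySem.Chars.isIn kp.1.toList tl)

lemma pv_exists_lt_prefix_iff (sub tl : List Char) (hsub : sub ≠ []) :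
    (∃ i, i < tl.length ∧ sub <+: tl.drop i) ↔ PySem.Chars.isIn sub tl = true := by
  rw [← PySem.Chars.exists_prefix_drop_iff_isIn]
  constructor
  · rintro ⟨i, _, hp⟩; exact ⟨i, hp⟩
  · rintro ⟨j, hp⟩
    by_cases hj : j < tl.length
    · exact ⟨j, hj, hp⟩
    · exfalso
      have : tl.drop j = [] := List.drop_eq_nil_of_le (by omega)
      rw [this] at hp
      exact hsub (List.prefix_nil.mp hp)

lemma pv_mem_flat_iff (tl : List Char) (x : Nat) :
    (x ∈ (List.range tl.length).flatMap (fun i =>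
        ((pvKeywords.filter (fun kp => kp.1.toList.isPrefixOf (tl.drop i))).map Prod.snd)))
    ↔ x ∈ (List.range 5).filter (fun p => pvRule tl p) := by
  have hk : ∀ kp ∈ pvKeywords, kp.1.toList ≠ [] ∧ kp.2 < 5 := by decide
  simp only [List.mem_flatMap, List.mem_range, List.mem_map, List.mem_filter,
    pvRule, List.any_eq_true, List.isPrefixOf_iff_prefix, beq_iff_eq]
  constructor
  · rintro ⟨i, hi, kp, ⟨hkp, hpref⟩, hx⟩
    refine ⟨by rw [← hx]; exact (hk kp hkp).2, kp, ⟨hkp, hx⟩, ?_⟩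
    exact (pv_exists_lt_prefix_iff kp.1.toList tl (hk kp hkp).1).mp ⟨i, hi, hpref⟩
  · rintro ⟨hx5, kp, ⟨hkp, hpx⟩, hin⟩
    obtain ⟨i, hi, hpref⟩ :=
      (pv_exists_lt_prefix_iff kp.1.toList tl (hk kp hkp).1).mpr hin
    exact ⟨i, hi, kp, ⟨hkp, hpref⟩, hpx⟩

lemma pvScan_mins (tl : List Char) :
    pvScanLoop tl (List.range tl.length) none
      = pvMins ((List.range 5).filter (fun p => pvRule tl p)) := by
  rw [pvScan_eq_foldl]
  exact pvMins_congr _ _ (fun x => pv_mem_flat_iff tl x)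

lemma pv_bridge (b0 b1 b2 b3 b4 q : Bool) :
    (if b0 then "I don't think that's the best approach."
     else if b1 then "I'm not comfortable with this."
     else if b2 then "I'd prefer if we could pause this conversation."
     else if b3 then "I have a different perspective on this."
     else if b4 then "I don't think this meets our standards."
     else if q then "Could you help me understand this better?"
     else "I'd like to express this more constructively.")
    = (match pvMins ((List.range 5).filter
          (fun p => [b0, b1, b2, b3, b4].getD p false)) with
       | some best => pvMessages.getD best ""
       | none =>
           if q then "Could you help me understand this better?"
           else "I'd like to express this more constructively.") := by
  revert b0 b1 b2 b3 b4 q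
  decide

lemma pv_rule_cond (tl : List Char) (p : Nat) (hp : p ∈ List.range 5) :
    pvRule tl p = [pvRule tl 0, pvRule tl 1, pvRule tl 2, pvRule tl 3, pvRule tl 4].getD p false := by
  fin_cases hp <;> rfl

-- ===== VERDICT (by name: the statement is the Claim_ definition above) =====
theorem create_generic_polite_message_spec : Claim_equal_create_generic_polite_message := by
  intro t _
  unfold Spec_create_generic_polite_message
  simp only [create_generic_polite_message, create_generic_polite_message_alt]
  rw [pvScan_mins, List.filter_congr (pv_rule_cond (PySem.Str.lower t).toList)]
  have h0 : (["stupid", "dumb", "idiot", "moron"].any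
      (fun word => PySem.Str.isIn word (PySem.Str.lower t)))
      = pvRule (PySem.Str.lower t).toList 0 := by
    simp [pvRule, pvKeywords]
  have h1 : (["hate", "awful", "terrible", "worst"].any
      (fun word => PySem.Str.isIn word (PySem.Str.lower t)))
      = pvRule (PySem.Str.lower t).toList 1 := by
    simp [pvRule, pvKeywords]
  have h2 : (["shut up", "shut", "quiet"].any
      (fun word => PySem.Str.isIn word (PySem.Str.lower t)))
      = pvRule (PySem.Str.lower t).toList 2 := by
    simp [pvRule, pvKeywords]
  have h3 : (["wrong", "disagree", "no"].any
      (fun word => PySem.Str.isIn word (PySem.Str.lower t)))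
      = pvRule (PySem.Str.lower t).toList 3 := by
    simp [pvRule, pvKeywords]
  have h4 : (["ugly", "bad", "trash"].any
      (fun word => PySem.Str.isIn word (PySem.Str.lower t)))
      = pvRule (PySem.Str.lower t).toList 4 := by
    simp [pvRule, pvKeywords]
  rw [h0, h1, h2, h3, h4]
  exact pv_bridge _ _ _ _ _ _
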